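-- pv_equiv track=rewrite | github.com/Yawson3393/DataInsightEngine_V1.0 | backend/app/pipeline/worker_process.py | _extract_rack_id
-- ===== SOURCE A (Python) =====
-- def _extract_rack_id(fname: str) -> str:
--     # fname contains "rack1", "rack2", ...
--     idx = fname.find("rack")
--     if idx == -1:
--         return "unknown"
--     num_part = ""
--     for ch in fname[idx+4:]:
--         if ch.isdigit():
--             num_part += ch
--         else:
--             break
--     return f"rack{num_part}"
-- ===== SOURCE B (Python) =====
-- def _extract_rack_id(fname: str) -> str:
--     # Locate the marker with str.partition, then strip the leading digit run
--     # off the remainder and slice it back out -- no index arithmetic, no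
--     # explicit character loop.
--     _, sep, rest = fname.partition("rack")
--     if not sep:
--         return "unknown"
--     tail = rest.lstrip("0123456789")
--     return "rack" + rest[:len(rest) - len(tail)]
-- ===== Notes on version B (the rewrite author's own statement) =====
-- stated objective: idiomatic
-- what changed: Replaces the manual find/index-arithmetic/char-accumulation loop with str.partition to split at the marker and lstrip('0123456789') plus a length-difference slice to peel off the digit run.
import Mathlib
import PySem

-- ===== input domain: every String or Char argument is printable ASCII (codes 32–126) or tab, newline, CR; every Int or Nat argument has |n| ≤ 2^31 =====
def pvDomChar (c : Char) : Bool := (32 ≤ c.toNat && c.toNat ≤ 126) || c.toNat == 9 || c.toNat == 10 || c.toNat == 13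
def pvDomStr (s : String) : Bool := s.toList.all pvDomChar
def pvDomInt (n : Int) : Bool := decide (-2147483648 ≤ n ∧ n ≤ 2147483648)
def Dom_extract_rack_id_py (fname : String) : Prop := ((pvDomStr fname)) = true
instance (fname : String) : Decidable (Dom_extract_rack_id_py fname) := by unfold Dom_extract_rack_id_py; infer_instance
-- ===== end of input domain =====

-- B replaces A's find/index-arithmetic/char-accumulation loop with partition + lstrip of digits + a length-difference slice (idiomatic; same cost).


-- ===== PORT A =====
-- the `for ch in fname[idx+4:]: if ch.isdigit(): num_part += ch else: break` loop, state = num_part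
def pvALoop : List Char → List Char → List Char
  | [], acc => acc
  | c :: rest, acc => if PySem.Chars.isdigit c then pvALoop rest (acc ++ [c]) else acc

def extract_rack_id_py (fname : String) : String :=
  let idx := PySem.Str.find fname "rack"
  if idx = -1 then "unknown"
  else
    let num_part := pvALoop (PySem.Str.slice fname (some (idx + 4)) none).toList []
    "rack" ++ String.ofList num_part

-- ===== PORT B =====
-- hand port of str.partition (exact): split at the first occurrence of sep, or (s, "", "") if sep is absent
def pvPartition (s sep : String) : String × String × String :=
  let i := PySem.Str.find s sep
  if i = -1 then (s, "", "")
  else (PySem.Str.slice s none (some i), sep, PySem.Str.slice s (some (i + PySem.Str.len sep)) none)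

-- hand port of s.lstrip("0123456789") (exact): drop the leading chars occurring in the chars argument
def pvLstripDigits (l : List Char) : List Char := l.dropWhile (fun c => c ∈ "0123456789".toList)

def extract_rack_id_py_alt (fname : String) : String :=
  let p := pvPartition fname "rack"
  if p.2.1 = "" then "unknown"
  else
    let rest := p.2.2
    let tail := pvLstripDigits rest.toList
    "rack" ++ (PySem.Str.slice rest none (some ((rest.toList.length : Int) - tail.length)))

-- ===== PRECONDITION & SPEC =====
def Spec_extract_rack_id_py (fname : String) (out : String) : Prop := out = extract_rack_id_py_alt fname
instance (fname : String) (out : String) : Decidable (Spec_extract_rack_id_py fname out) := by unfold Spec_extract_rack_id_py; infer_instance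

-- ===== CLAIM (what is proved, stated in full; the proofs are below) =====
def Claim_equal_extract_rack_id_py : Prop := ∀ (fname : String), Dom_extract_rack_id_py fname → Spec_extract_rack_id_py fname (extract_rack_id_py fname)

-- ===== LEMMAS AND PROOFS =====
lemma pvALoop_eq (l acc : List Char) : pvALoop l acc = acc ++ l.takeWhile PySem.Chars.isdigit := by
  induction l generalizing acc with
  | nil => simp [pvALoop]
  | cons c rest ih =>
    by_cases h : PySem.Chars.isdigit c
    · simp [pvALoop, h, ih]
    · simp [pvALoop, h]

lemma digit_pred_eq (c : Char) : (decide (c ∈ "0123456789".toList)) = PySem.Chars.isdigit c := by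
  have hd : "0123456789".toList = ['0','1','2','3','4','5','6','7','8','9'] := by decide
  rw [Bool.eq_iff_iff, hd]
  simp only [PySem.Chars.isdigit, decide_eq_true_eq, Bool.and_eq_true, List.mem_cons,
    List.not_mem_nil, or_false]
  have h : ∀ d : Char, c = d ↔ c.toNat = d.toNat := fun d =>
    ⟨fun h => h ▸ rfl, fun h => Char.ext (UInt32.toNat_inj.mp h)⟩
  have hle : ∀ d e : Char, d ≤ e ↔ d.toNat ≤ e.toNat := by
    intro d e; rw [Char.le_def, UInt32.le_iff_toNat_le]; rfl
  simp only [h, hle]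
  have h0 : ('0':Char).toNat = 48 := by decide
  have h1 : ('1':Char).toNat = 49 := by decide
  have h2 : ('2':Char).toNat = 50 := by decide
  have h3 : ('3':Char).toNat = 51 := by decide
  have h4 : ('4':Char).toNat = 52 := by decide
  have h5 : ('5':Char).toNat = 53 := by decide
  have h6 : ('6':Char).toNat = 54 := by decide
  have h7 : ('7':Char).toNat = 55 := by decide
  have h8 : ('8':Char).toNat = 56 := by decide
  have h9 : ('9':Char).toNat = 57 := by decide
  rw [h0, h1, h2, h3, h4, h5, h6, h7, h8, h9]
  omega

lemma take_sub_dropWhile (l : List Char) (p : Char → Bool) :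
    l.take (l.length - (l.dropWhile p).length) = l.takeWhile p := by
  conv_lhs => rw [← List.takeWhile_append_dropWhile (p := p) (l := l)]
  rw [List.length_append]
  simp
  exact (List.prefix_iff_eq_take.mp ⟨_, List.takeWhile_append_dropWhile⟩).symm

lemma str_slice_take (s : String) (n : Nat) :
    PySem.Str.slice s none (some (n:Int)) = String.ofList (s.toList.take n) := by
  have h : (PySem.Str.slice s none (some (n:Int))).toList = s.toList.take n := by
    simp [PySem.List.slice_to]
  rw [← h, String.ofList_toList]

set_option maxHeartbeats 1000000 in
theorem extract_rack_id_py_main (fname : String) :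
    extract_rack_id_py fname = extract_rack_id_py_alt fname := by
  simp only [extract_rack_id_py, extract_rack_id_py_alt, pvPartition]
  by_cases h : PySem.Str.find fname "rack" = -1
  · rw [if_pos h, if_pos h]
    norm_num
  · rw [if_neg h, if_neg h, if_neg (by decide : ¬(("rack":String) = ""))]
    have hlen : PySem.Str.len ("rack":String) = 4 := by decide
    rw [hlen]
    generalize PySem.Str.slice fname (some (PySem.Str.find fname "rack" + 4)) none = R
    congr 1
    have hdle : (pvLstripDigits R.toList).length ≤ R.toList.length :=
      List.length_dropWhile_le _ _
    have hm : ((R.toList.length : Int) - ((pvLstripDigits R.toList).length : Int))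
        = ((R.toList.length - (pvLstripDigits R.toList).length : Nat) : Int) := by omega
    rw [hm, str_slice_take]
    congr 1
    rw [pvALoop_eq, List.nil_append, pvLstripDigits, take_sub_dropWhile]
    congr 1
    exact funext (fun c => (digit_pred_eq c).symm)

-- ===== VERDICT (by name: the statement is the Claim_ definition above) =====
theorem extract_rack_id_py_spec : Claim_equal_extract_rack_id_py := by
  intro fname _
  exact extract_rack_id_py_main fname
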